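-- pv_equiv track=rewrite | github.com/seandickert/vim-config | bundle/py_vim/libs/python_imp.py | get_space
-- ===== SOURCE A (Python) =====
-- def get_space(line):
--     ret = ''
--     for c in line:
--         if c == ' ':
--             ret = ret + ' '
--         else:
--             break
--     return ret
-- ===== SOURCE B (Python) =====
-- def get_space(line):
--     count = len(line) - len(line.lstrip(' '))
--     return line[:count]
-- ===== Notes on version B (the rewrite author's own statement) =====
-- stated objective: idiomatic
-- what changed: Replaces the character-by-character accumulate-with-break loop by a measure-then-slice decomposition: strip the leading spaces once with lstrip, take the length difference as the count, and slice that prefix.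
import Mathlib
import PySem

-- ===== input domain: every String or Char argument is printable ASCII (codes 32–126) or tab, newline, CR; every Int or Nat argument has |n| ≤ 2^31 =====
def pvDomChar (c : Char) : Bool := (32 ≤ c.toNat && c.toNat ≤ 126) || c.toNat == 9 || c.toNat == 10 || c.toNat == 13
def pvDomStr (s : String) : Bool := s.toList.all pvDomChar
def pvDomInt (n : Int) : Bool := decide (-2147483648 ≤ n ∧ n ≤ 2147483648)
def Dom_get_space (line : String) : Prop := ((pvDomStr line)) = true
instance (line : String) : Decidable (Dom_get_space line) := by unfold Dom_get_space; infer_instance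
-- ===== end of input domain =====

-- B replaces A's accumulate-with-break loop by a measure-then-slice decomposition (idiomatic; return value only).

-- ===== PORT A =====
-- the for-loop with break, accumulating ret; the break is the early return in the non-space branch
def getSpaceLoop : List Char → String → String
  | [], ret => ret
  | c :: cs, ret => if c == ' ' then getSpaceLoop cs (ret ++ " ") else ret

def get_space (line : String) : String :=
  getSpaceLoop line.toList ""

-- ===== PORT B =====
def get_space_alt (line : String) : String :=
  -- line.lstrip(' '): ported by hand as dropWhile (· == ' ') — exact, since only the single char ' ' is stripped
  let stripped : List Char := line.toList.dropWhile (· == ' ')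
  let count : Int := (line.toList.length : Int) - (stripped.length : Int)
  String.ofList (PySem.List.slice line.toList none (some count))

-- ===== PRECONDITION & SPEC =====
def Spec_get_space (line : String) (out : String) : Prop := out = get_space_alt line
instance (line : String) (out : String) : Decidable (Spec_get_space line out) := by unfold Spec_get_space; infer_instance

-- ===== CLAIM (what is proved, stated in full; the proofs are below) =====
def Claim_equal_get_space : Prop := ∀ (line : String), Dom_get_space line → Spec_get_space line (get_space line)

-- ===== LEMMAS AND PROOFS =====

theorem getSpaceLoop_eq (l : List Char) (ret : String) :
    getSpaceLoop l ret = ret ++ String.ofList (l.takeWhile (· == ' ')) := by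
  induction l generalizing ret with
  | nil =>
    apply String.toList_injective
    simp [getSpaceLoop]
  | cons c cs ih =>
    by_cases h : c = ' '
    · subst h
      apply String.toList_injective
      simp [getSpaceLoop, ih]
    · apply String.toList_injective
      simp [getSpaceLoop, h]

theorem get_space_eq (line : String) :
    get_space line = String.ofList (line.toList.takeWhile (· == ' ')) := by
  rw [get_space, getSpaceLoop_eq]
  apply String.toList_injective
  simp

theorem get_space_alt_eq (line : String) :
    get_space_alt line = String.ofList (line.toList.takeWhile (· == ' ')) := by
  unfold get_space_alt
  have hsplit := List.takeWhile_append_dropWhile (p := (· == ' ')) (l := line.toList)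
  have hlen : line.toList.length =
      (line.toList.takeWhile (· == ' ')).length + (line.toList.dropWhile (· == ' ')).length := by
    conv_lhs => rw [← hsplit]
    exact List.length_append
  have hcount : ((line.toList.length : Int) - ((line.toList.dropWhile (· == ' ')).length : Int))
      = ((line.toList.takeWhile (· == ' ')).length : Int) := by
    omega
  simp only [hcount, PySem.List.slice_to_natCast]
  congr 1
  have hpref : line.toList.takeWhile (· == ' ') <+: line.toList := List.takeWhile_prefix _
  exact (List.prefix_iff_eq_take.mp hpref).symm

-- ===== VERDICT (by name: the statement is the Claim_ definition above) =====
theorem get_space_spec : Claim_equal_get_space := by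
  intro line _
  unfold Spec_get_space
  rw [get_space_eq, get_space_alt_eq]
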